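-- pv_equiv track=rewrite | github.com/systragroup/quetzal | syspy/surveys/discrete_choice.py | get_array_class
-- ===== SOURCE A (Python) =====
-- def get_array_class(factors):
--     array_class = {}
--     join = {}
--
--     for factor, levels in factors.items():
--         key = len(levels)
--         if key in array_class:
--             array_class[key] += 1
--         else:
--             array_class[key] = 1
--
--         factor_index = array_class[key] - 1
--         join[str(key) + 'e' + str(factor_index)] = factor
--     return array_class, join
-- ===== SOURCE B (Python) =====
-- def get_array_class(factors):
--     # Grouping-then-enumeration: collect for each level-count the positions of
--     # its factors, then scatter 'keyeN' labels back into original order.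
--     names = list(factors)
--     keys = [len(levels) for levels in factors.values()]
--     groups = {}
--     for pos, k in enumerate(keys):
--         groups.setdefault(k, []).append(pos)
--     array_class = {k: len(ps) for k, ps in groups.items()}
--     labels = [''] * len(keys)
--     for k, ps in groups.items():
--         for i, p in enumerate(ps):
--             labels[p] = str(k) + 'e' + str(i)
--     join = {lab: name for lab, name in zip(labels, names)}
--     return array_class, join
-- ===== Notes on version B (the rewrite author's own statement) =====
-- stated objective: alternative
-- what changed: Replaces A's single pass with an incremental per-key counter by a grouping-then-enumeration scheme: one pass groups positions under each level-count into a dict of position lists, array_class is read off as group sizes, and the 'keyeN' join labels are produced by enumerating each group and scattered back into a label array in original order.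
import Mathlib
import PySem

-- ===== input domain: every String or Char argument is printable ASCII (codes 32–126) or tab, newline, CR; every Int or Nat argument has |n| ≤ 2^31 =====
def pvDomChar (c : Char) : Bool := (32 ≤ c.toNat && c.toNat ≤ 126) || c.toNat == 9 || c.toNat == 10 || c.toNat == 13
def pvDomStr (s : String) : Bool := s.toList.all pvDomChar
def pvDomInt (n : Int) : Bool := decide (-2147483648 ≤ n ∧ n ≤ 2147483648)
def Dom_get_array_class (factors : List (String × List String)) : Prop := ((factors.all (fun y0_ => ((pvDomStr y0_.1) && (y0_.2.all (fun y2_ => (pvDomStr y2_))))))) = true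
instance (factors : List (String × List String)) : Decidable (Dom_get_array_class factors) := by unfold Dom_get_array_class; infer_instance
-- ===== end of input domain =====

-- B replaces A's single pass with an incremental per-key counter by a grouping-then-
-- enumeration scheme (group positions under each level-count, read counts off as group
-- sizes, scatter enumerated 'keyeN' labels back into original order): an alternative
-- decomposition of the same cost, proved to return the same pair of dicts.


-- ===== PORT A =====
def get_array_class (factors : List (String × List String)) : (List (Int × Int)) × (List (String × String)) :=
  let st := factors.foldl
    (fun (st : PySem.Dict Int Int × PySem.Dict String String) p =>
      let key : Int := (p.2.length : Int)
      let ac := if st.1.contains key then st.1.modify key 0 (· + 1) else st.1.insert key 1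
      let factor_index := ac.getD key 0 - 1
      (ac, st.2.insert (PySem.Int.toStr key ++ "e" ++ PySem.Int.toStr factor_index) p.1))
    (PySem.Dict.empty, PySem.Dict.empty)
  (st.1.items, st.2.items)

-- ===== PORT B =====
def get_array_class_alt (factors : List (String × List String)) : (List (Int × Int)) × (List (String × String)) :=
  let names : List String := factors.map Prod.fst
  let keys : List Int := factors.map (fun p => (p.2.length : Int))
  -- groups.setdefault(k, []).append(pos): exactly Dict.modify with default []
  let groups : PySem.Dict Int (List Int) :=
    (PySem.List.enumerate keys).foldl (fun g q => g.modify q.2 [] (· ++ [q.1])) PySem.Dict.empty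
  let array_class : PySem.Dict Int Int :=
    groups.items.foldl (fun d q => d.insert q.1 ((q.2.length : Int))) PySem.Dict.empty
  let labels0 : List String := PySem.List.pyRepeat [""] (keys.length : Int)
  let labels : List String :=
    groups.items.foldl (fun ls q =>
      (PySem.List.enumerate q.2).foldl (fun ls r =>
        ls.set r.2.toNat (PySem.Int.toStr q.1 ++ "e" ++ PySem.Int.toStr r.1)) ls) labels0
  let join : PySem.Dict String String :=
    (labels.zip names).foldl (fun d q => d.insert q.1 q.2) PySem.Dict.empty
  (array_class.items, join.items)

-- ===== PRECONDITION & SPEC =====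
def Spec_get_array_class (factors : List (String × List String)) (out : (List (Int × Int)) × (List (String × String))) : Prop := out = get_array_class_alt factors
instance (factors : List (String × List String)) (out : (List (Int × Int)) × (List (String × String))) : Decidable (Spec_get_array_class factors out) := by unfold Spec_get_array_class; infer_instance

-- ===== CLAIM (what is proved, stated in full; the proofs are below) =====
def Claim_equal_get_array_class : Prop := ∀ (factors : List (String × List String)), Dom_get_array_class factors → Spec_get_array_class factors (get_array_class factors)

-- ===== LEMMAS AND PROOFS =====

-- the level-count list and the common characterization of the join dict (prefix counts)
def pvKeysOf (fs : List (String × List String)) : List Int := fs.map (fun p => (p.2.length : Int))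

def pvJoin (fs : List (String × List String)) : PySem.Dict String String :=
  (PySem.List.enumerate ((fs.map Prod.fst).zip (pvKeysOf fs))).foldl
    (fun d q => d.insert
      (PySem.Int.toStr q.2.2 ++ "e" ++
        PySem.Int.toStr ((PySem.List.count (PySem.List.slice (pvKeysOf fs) none (some q.1)) q.2.2 : Int)))
      q.2.1)
    PySem.Dict.empty

-- ---------- A-side: A's fold = (Counter of keys, pvJoin) ----------

lemma pv_step_eq_modify (d : PySem.Dict Int Int) (k : Int) :
    (if d.contains k then d.modify k 0 (· + 1) else d.insert k 1) = d.modify k 0 (· + 1) := by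
  by_cases h : d.contains k
  · simp [h]
  · simp [h]
    simp [PySem.Dict.insert, PySem.Dict.modify, h]
    exact PySem.Dict.getD_of_not_contains d 0 (by simpa using h)

lemma pv_join_append (fs : List (String × List String)) (f : String × List String) :
    pvJoin (fs ++ [f]) = (pvJoin fs).insert
      (PySem.Int.toStr (f.2.length : Int) ++ "e" ++
        PySem.Int.toStr ((PySem.List.count (pvKeysOf fs) (f.2.length : Int) : Int))) f.1 := by
  have hlen : (fs.map Prod.fst).length = (pvKeysOf fs).length := by simp [pvKeysOf]
  have hK : pvKeysOf (fs ++ [f]) = pvKeysOf fs ++ [(f.2.length : Int)] := by simp [pvKeysOf]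
  have hzlen : ((fs.map Prod.fst).zip (pvKeysOf fs)).length = fs.length := by
    simp [List.length_zip, pvKeysOf]
  have hKlen : (pvKeysOf fs).length = fs.length := by simp [pvKeysOf]
  unfold pvJoin
  rw [hK]
  rw [show (fs ++ [f]).map Prod.fst = fs.map Prod.fst ++ [f.1] by simp]
  rw [List.zip_append hlen]
  rw [show [f.1].zip [((f.2.length : Int))] = [(f.1, (f.2.length : Int))] from rfl]
  rw [PySem.List.enumerate_append, List.foldl_append]
  have hpref : List.foldl
      (fun d q => d.insert
        (PySem.Int.toStr q.2.2 ++ "e" ++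
          PySem.Int.toStr ((PySem.List.count (PySem.List.slice (pvKeysOf fs ++ [(f.2.length : Int)]) none (some q.1)) q.2.2 : Int)))
        q.2.1)
      PySem.Dict.empty (PySem.List.enumerate ((fs.map Prod.fst).zip (pvKeysOf fs)))
      = List.foldl
      (fun d q => d.insert
        (PySem.Int.toStr q.2.2 ++ "e" ++
          PySem.Int.toStr ((PySem.List.count (PySem.List.slice (pvKeysOf fs) none (some q.1)) q.2.2 : Int)))
        q.2.1)
      PySem.Dict.empty (PySem.List.enumerate ((fs.map Prod.fst).zip (pvKeysOf fs))) := by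
    apply PySem.List.foldl_congr_mem
    intro acc q hq
    obtain ⟨k, hk, rfl⟩ := (PySem.List.mem_enumerate_iff _ _ _).mp hq
    congr 3
    rw [PySem.List.slice_to _ (by omega), PySem.List.slice_to _ (by omega)]
    rw [List.take_append_of_le_length (by omega)]
  rw [hpref]
  simp only [PySem.List.enumerate_cons, PySem.List.enumerate_nil, List.foldl_cons, List.foldl_nil]
  congr 3
  rw [PySem.List.slice_to _ (by positivity)]
  rw [show (0 + (((fs.map Prod.fst).zip (pvKeysOf fs)).length : Int)).toNat
        = (pvKeysOf fs).length by omega]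
  rw [List.take_left]

lemma pv_main (fs : List (String × List String)) :
    fs.foldl
      (fun (st : PySem.Dict Int Int × PySem.Dict String String) p =>
        let key : Int := (p.2.length : Int)
        let ac := if st.1.contains key then st.1.modify key 0 (· + 1) else st.1.insert key 1
        let factor_index := ac.getD key 0 - 1
        (ac, st.2.insert (PySem.Int.toStr key ++ "e" ++ PySem.Int.toStr factor_index) p.1))
      (PySem.Dict.empty, PySem.Dict.empty)
    = (PySem.Dict.counter (pvKeysOf fs), pvJoin fs) := by
  induction fs using List.reverseRecOn with
  | nil =>
      rw [show pvKeysOf [] = ([] : List Int) from rfl, PySem.Dict.counter_eq_foldl]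
      rfl
  | append_singleton fs f ih =>
      rw [List.foldl_append, ih]
      simp only [List.foldl_cons, List.foldl_nil]
      have hstep : (if (PySem.Dict.counter (pvKeysOf fs)).contains ((f.2.length : Int))
            then (PySem.Dict.counter (pvKeysOf fs)).modify ((f.2.length : Int)) 0 (· + 1)
            else (PySem.Dict.counter (pvKeysOf fs)).insert ((f.2.length : Int)) 1)
          = PySem.Dict.counter (pvKeysOf (fs ++ [f])) := by
        rw [pv_step_eq_modify, show pvKeysOf (fs ++ [f]) = pvKeysOf fs ++ [(f.2.length : Int)] by
              simp [pvKeysOf],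
            PySem.Dict.counter_append_singleton]
      rw [hstep, pv_join_append]
      have hgd : (PySem.Dict.counter (pvKeysOf (fs ++ [f]))).getD ((f.2.length : Int)) 0 - 1
          = ((PySem.List.count (pvKeysOf fs) ((f.2.length : Int)) : Int)) := by
        rw [PySem.Dict.getD_counter]
        rw [show pvKeysOf (fs ++ [f]) = pvKeysOf fs ++ [(f.2.length : Int)] by simp [pvKeysOf]]
        rw [show PySem.List.count (pvKeysOf fs) ((f.2.length : Int))
              = List.count ((f.2.length : Int)) (pvKeysOf fs) from rfl]
        simp [List.count_append]
      rw [hgd]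

-- ---------- B-side: groups, positions, labels ----------

def pvGroups (keys : List Int) : PySem.Dict Int (List Int) :=
  (PySem.List.enumerate keys).foldl (fun g q => g.modify q.2 [] (· ++ [q.1])) PySem.Dict.empty

def pvPosOf (keys : List Int) (k : Int) : List Int :=
  ((PySem.List.enumerate keys).filter (fun q => q.2 == k)).map Prod.fst

def pvLabelAt (keys : List Int) (j : Nat) : String :=
  PySem.Int.toStr (keys.getD j 0) ++ "e" ++
    PySem.Int.toStr (((keys.take j).count (keys.getD j 0) : Int))

def pvWrites (keys : List Int) : List (Int × String) :=
  (pvGroups keys).items.flatMap (fun q =>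
    (PySem.List.enumerate q.2).map (fun r => (r.2, PySem.Int.toStr q.1 ++ "e" ++ PySem.Int.toStr r.1)))

lemma pv_groups_keys (keys : List Int) :
    (pvGroups keys).keys = PySem.Set.ofList keys := by
  unfold pvGroups
  rw [PySem.Dict.keys_foldl_modify_key (key := fun (q : Int × Int) => q.2) (f := fun _ q => (· ++ [q.1])) (d0 := []) (d := PySem.Dict.empty) (l := PySem.List.enumerate keys)]
  simp [PySem.List.map_snd_enumerate, PySem.Dict.keys_empty, PySem.Set.update,
        PySem.Set.ofList_eq_foldl]

lemma pv_groups_nodup (keys : List Int) : (pvGroups keys).keys.Nodup := by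
  unfold pvGroups
  exact PySem.Dict.nodup_keys_foldl_modify_key (key := fun (q : Int × Int) => q.2) (f := fun _ q => (· ++ [q.1])) (d0 := []) (d := PySem.Dict.empty) (l := PySem.List.enumerate keys) (by simp [PySem.Dict.keys_empty])

lemma pv_groups_getD (keys : List Int) (k : Int) :
    (pvGroups keys).getD k [] = pvPosOf keys k := by
  unfold pvGroups pvPosOf
  rw [show (PySem.List.enumerate keys).foldl (fun g q => g.modify q.2 [] (· ++ [q.1])) PySem.Dict.empty
        = ((PySem.List.enumerate keys).map (fun q => (q.2, q.1))).foldl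
            (fun d p => d.modify p.1 [] (· ++ [p.2])) PySem.Dict.empty by
      rw [List.foldl_map]]
  rw [PySem.Dict.getD_foldl_modify_append]
  simp [List.filter_map, List.map_map, Function.comp_def]

lemma pv_groups_items (keys : List Int) :
    (pvGroups keys).items = (PySem.Set.ofList keys).map (fun k => (k, pvPosOf keys k)) := by
  rw [PySem.Dict.items_eq_map_keys _ (pv_groups_nodup keys) [], pv_groups_keys]
  exact List.map_congr_left (fun k _ => by rw [pv_groups_getD])

lemma pv_filter_enum_length (keys : List Int) (k : Int) (s : Int) :
    ((PySem.List.enumerate keys s).filter (fun q => q.2 == k)).length = keys.count k := by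
  induction keys generalizing s with
  | nil => simp [PySem.List.enumerate_nil]
  | cons x t ih =>
      rw [PySem.List.enumerate_cons, List.filter_cons]
      by_cases hx : x = k
      · simp [hx, ih]
      · simp [hx, ih]

lemma pv_posOf_length (keys : List Int) (k : Int) :
    (pvPosOf keys k).length = keys.count k := by
  unfold pvPosOf
  rw [List.length_map, pv_filter_enum_length]

lemma pv_posOf_mem (keys : List Int) (k : Int) (p : Int) :
    p ∈ pvPosOf keys k ↔ ∃ m : Nat, ∃ h : m < keys.length, p = (m : Int) ∧ keys[m] = k := by
  unfold pvPosOf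
  simp only [List.mem_map, List.mem_filter, PySem.List.mem_enumerate_iff]
  constructor
  · rintro ⟨q, ⟨⟨m, hm, rfl⟩, hk⟩, rfl⟩
    exact ⟨m, hm, by simp, by simpa using hk⟩
  · rintro ⟨m, hm, rfl, hk⟩
    exact ⟨((m : Int), keys[m]), ⟨⟨m, hm, by simp⟩, by simpa using hk⟩, rfl⟩

lemma pv_posOf_pairwise (keys : List Int) (k : Int) :
    (pvPosOf keys k).Pairwise (· < ·) := by
  unfold pvPosOf
  rw [List.pairwise_map]
  exact (PySem.List.pairwise_lt_enumerate keys 0).filter _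

lemma pv_posOf_nodup (keys : List Int) (k : Int) : (pvPosOf keys k).Nodup :=
  (pv_posOf_pairwise keys k).imp ne_of_lt

lemma pv_posOf_snoc (keys : List Int) (k' k : Int) :
    pvPosOf (keys ++ [k']) k
      = pvPosOf keys k ++ (if k' == k then [(keys.length : Int)] else []) := by
  unfold pvPosOf
  rw [PySem.List.enumerate_append, List.filter_append, List.map_append]
  congr 1
  rw [PySem.List.enumerate_cons, PySem.List.enumerate_nil]
  by_cases h : k' = k
  · simp [h]
  · simp [h]

lemma pv_posOf_take (keys : List Int) (j : Nat) (hj : j < keys.length) :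
    (keys.take j).count keys[j] < (pvPosOf keys keys[j]).length ∧
      (pvPosOf keys keys[j]).getD ((keys.take j).count keys[j]) 0 = (j : Int) := by
  induction keys using List.reverseRecOn with
  | nil => simp at hj
  | append_singleton t k' ih =>
      rw [List.length_append, List.length_singleton] at hj
      by_cases hjt : j < t.length
      · have hget : (t ++ [k'])[j] = t[j] := List.getElem_append_left hjt
        have htake : (t ++ [k']).take j = t.take j := by
          rw [List.take_append_of_le_length (le_of_lt hjt)]
        rw [hget, htake, pv_posOf_snoc]
        obtain ⟨h1, h2⟩ := ih hjt
        constructor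
        · calc (t.take j).count t[j] < (pvPosOf t t[j]).length := h1
            _ ≤ _ := by rw [List.length_append]; omega
        · rw [List.getD_append _ _ _ _ h1] at *
          exact h2
      · have hj' : j = t.length := by omega
        subst hj'
        have hget : (t ++ [k'])[t.length] = k' := by simp
        have htake : (t ++ [k']).take t.length = t := by simp
        rw [hget, htake, pv_posOf_snoc]
        simp only [beq_self_eq_true, if_true]
        have hlen : (pvPosOf t k').length = t.count k' := pv_posOf_length t k'
        constructor
        · rw [List.length_append, hlen]; simp
        · rw [List.getD_append_right _ _ _ _ (by omega)]
          rw [hlen]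
          simp

lemma pv_writes_char (keys : List Int) (w : Int × String) (hw : w ∈ pvWrites keys) :
    ∃ m : Nat, m < keys.length ∧ w.1 = (m : Int) ∧ w.2 = pvLabelAt keys m := by
  unfold pvWrites at hw
  rw [pv_groups_items] at hw
  obtain ⟨q, hq, hw⟩ := List.mem_flatMap.mp hw
  obtain ⟨k, hk, rfl⟩ := List.mem_map.mp hq
  obtain ⟨r, hr, rfl⟩ := List.mem_map.mp hw
  obtain ⟨i, hi, rfl⟩ := (PySem.List.mem_enumerate_iff _ _ _).mp hr
  have hmem : (pvPosOf keys k)[i] ∈ pvPosOf keys k := List.getElem_mem hi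
  obtain ⟨m, hm, hp, hkm⟩ := (pv_posOf_mem keys k _).mp hmem
  subst hkm
  refine ⟨m, hm, by simpa using hp, ?_⟩
  obtain ⟨h1, h2⟩ := pv_posOf_take keys m hm
  have h2' : (pvPosOf keys keys[m])[(keys.take m).count keys[m]]'h1 = (m : Int) := by
    rw [← List.getD_eq_getElem _ 0 h1]; exact h2
  have : i = (keys.take m).count keys[m] := by
    apply (pv_posOf_nodup keys keys[m]).getElem_inj_iff.mp
    rw [h2', hp]
  subst this
  simp only [pvLabelAt]
  rw [List.getD_eq_getElem _ _ hm]
  simp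

lemma pv_writes_mem (keys : List Int) (j : Nat) (hj : j < keys.length) :
    ((j : Int), pvLabelAt keys j) ∈ pvWrites keys := by
  unfold pvWrites
  rw [pv_groups_items]
  apply List.mem_flatMap.mpr
  refine ⟨(keys[j], pvPosOf keys keys[j]), List.mem_map.mpr ⟨keys[j], ?_, rfl⟩, ?_⟩
  · exact (PySem.Set.mem_ofList keys keys[j]).mpr (List.getElem_mem hj)
  · apply List.mem_map.mpr
    obtain ⟨h1, h2⟩ := pv_posOf_take keys j hj
    refine ⟨(((keys.take j).count keys[j] : Int), (j : Int)), ?_, ?_⟩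
    · apply (PySem.List.mem_enumerate_iff _ _ _).mpr
      refine ⟨(keys.take j).count keys[j], h1, ?_⟩
      rw [← List.getD_eq_getElem _ 0 h1, h2]
      simp
    · simp only [pvLabelAt]
      rw [List.getD_eq_getElem _ _ hj]

-- scatter-fold facts
lemma pv_foldl_set_length (ws : List (Int × String)) (ls : List String) :
    (ws.foldl (fun ls w => ls.set w.1.toNat w.2) ls).length = ls.length := by
  induction ws generalizing ls with
  | nil => rfl
  | cons w t ih => simp [ih]

lemma pv_foldl_set_untouched (ws : List (Int × String)) (ls : List String) (j : Nat)
    (h : ∀ w ∈ ws, w.1.toNat ≠ j) :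
    (ws.foldl (fun ls w => ls.set w.1.toNat w.2) ls)[j]? = ls[j]? := by
  induction ws generalizing ls with
  | nil => rfl
  | cons w t ih =>
      simp only [List.foldl_cons]
      rw [ih _ (fun w hw => h w (List.mem_cons_of_mem _ hw)),
          List.getElem?_set_ne (h w (List.mem_cons_self))]

lemma pv_foldl_set_getElem? (ws : List (Int × String)) (ls : List String) (j : Nat)
    (hj : j < ls.length) (v : String)
    (h0 : ∀ w ∈ ws, 0 ≤ w.1)
    (h1 : ∀ w ∈ ws, w.1 = (j : Int) → w.2 = v)
    (h2 : ((j : Int), v) ∈ ws) :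
    (ws.foldl (fun ls w => ls.set w.1.toNat w.2) ls)[j]? = some v := by
  induction ws generalizing ls with
  | nil => simp at h2
  | cons w t ih =>
      simp only [List.foldl_cons]
      by_cases hw : w.1 = (j : Int)
      · have hv : w.2 = v := h1 w List.mem_cons_self hw
        by_cases h2' : ((j : Int), v) ∈ t
        · exact ih _ (by simpa using hj) (fun w hw => h0 w (List.mem_cons_of_mem _ hw))
            (fun w hw => h1 w (List.mem_cons_of_mem _ hw)) h2'
        · rw [pv_foldl_set_untouched]
          · have hset : w.1.toNat = j := by omega
            rw [hset, List.getElem?_set_self (by simpa using hj), hv]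
          · intro w' hw' hc
            have h0' := h0 w' (List.mem_cons_of_mem _ hw')
            have hfst : w'.1 = (j : Int) := by omega
            have : w' = ((j : Int), v) :=
              Prod.ext hfst (h1 w' (List.mem_cons_of_mem _ hw') hfst)
            exact h2' (this ▸ hw')
      · have h2t : ((j : Int), v) ∈ t := by
          rcases List.mem_cons.mp h2 with h | h
          · exact absurd (congrArg Prod.fst h.symm) hw
          · exact h
        exact ih _ (by simpa using hj) (fun w hw => h0 w (List.mem_cons_of_mem _ hw))
          (fun w hw => h1 w (List.mem_cons_of_mem _ hw)) h2t

lemma pv_labels_eq (keys : List Int) :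
    (pvGroups keys).items.foldl (fun ls q =>
        (PySem.List.enumerate q.2).foldl (fun ls r =>
          ls.set r.2.toNat (PySem.Int.toStr q.1 ++ "e" ++ PySem.Int.toStr r.1)) ls)
      (PySem.List.pyRepeat [""] (keys.length : Int))
    = (List.range keys.length).map (pvLabelAt keys) := by
  have hrep : PySem.List.pyRepeat [""] (keys.length : Int) = List.replicate keys.length "" := by
    rw [PySem.List.pyRepeat_singleton]; simp
  have hflat : (pvGroups keys).items.foldl (fun ls q =>
        (PySem.List.enumerate q.2).foldl (fun ls r =>
          ls.set r.2.toNat (PySem.Int.toStr q.1 ++ "e" ++ PySem.Int.toStr r.1)) ls)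
      (PySem.List.pyRepeat [""] (keys.length : Int))
      = (pvWrites keys).foldl (fun ls w => ls.set w.1.toNat w.2)
          (PySem.List.pyRepeat [""] (keys.length : Int)) := by
    unfold pvWrites
    rw [List.foldl_flatMap]
    apply PySem.List.foldl_congr_mem
    intro acc q _
    rw [List.foldl_map]
  rw [hflat, hrep]
  apply List.ext_getElem?
  intro j
  by_cases hj : j < keys.length
  · rw [pv_foldl_set_getElem? _ _ j (by simp [hj]) (pvLabelAt keys j)
        (fun w hw => by obtain ⟨m, _, h1, _⟩ := pv_writes_char keys w hw; omega)
        (fun w hw hwj => by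
          obtain ⟨m, _, h1, h2⟩ := pv_writes_char keys w hw
          have : m = j := by omega
          rw [h2, this])
        (pv_writes_mem keys j hj)]
    rw [List.getElem?_map, List.getElem?_range hj]
    rfl
  · rw [List.getElem?_eq_none_iff.mpr, List.getElem?_eq_none_iff.mpr]
    · simp; omega
    · rw [pv_foldl_set_length]; simp; omega

lemma pv_zip_eq (fs : List (String × List String)) :
    ((List.range (pvKeysOf fs).length).map (pvLabelAt (pvKeysOf fs))).zip (fs.map Prod.fst)
    = (PySem.List.enumerate ((fs.map Prod.fst).zip (pvKeysOf fs))).map (fun q =>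
        (PySem.Int.toStr q.2.2 ++ "e" ++
          PySem.Int.toStr ((PySem.List.count (PySem.List.slice (pvKeysOf fs) none (some q.1)) q.2.2 : Int)),
         q.2.1)) := by
  have hng : (fs.map Prod.fst).length = fs.length := by simp
  have hnk : (pvKeysOf fs).length = fs.length := by simp [pvKeysOf]
  apply List.ext_getElem
  · simp [PySem.List.length_enumerate, hng, hnk]
  · intro j h1 h2
    have hj : j < fs.length := by simp [PySem.List.length_enumerate, hng, hnk] at h2; omega
    simp only [List.getElem_zip, List.getElem_map, PySem.List.getElem_enumerate,
        List.getElem_range]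
    have hsl : PySem.List.slice (pvKeysOf fs) none (some ((0 : Int) + (j : Int)))
        = (pvKeysOf fs).take j := by
      rw [PySem.List.slice_to _ (by omega)]
      congr 1
      omega
    simp only [hsl]
    have hcnt : PySem.List.count ((pvKeysOf fs).take j) ((pvKeysOf fs)[j]'(by omega))
        = List.count ((pvKeysOf fs)[j]'(by omega)) ((pvKeysOf fs).take j) := rfl
    simp only [pvLabelAt, hcnt]
    rw [List.getD_eq_getElem _ _ (by omega)]

lemma pv_alt_eq (fs : List (String × List String)) :
    get_array_class_alt fs = ((PySem.Dict.counter (pvKeysOf fs)).items, (pvJoin fs).items) := by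
  unfold get_array_class_alt
  have hK : fs.map (fun p => ((p.2.length : Int))) = pvKeysOf fs := rfl
  simp only [hK]
  have hac : ((pvGroups (pvKeysOf fs)).items.foldl
        (fun d q => d.insert q.1 ((q.2.length : Int))) PySem.Dict.empty).items
      = (PySem.Dict.counter (pvKeysOf fs)).items := by
    rw [PySem.Dict.items_foldl_insert_fresh (l := (pvGroups (pvKeysOf fs)).items)
        (k := fun q : Int × List Int => q.1) (v := fun q : Int × List Int => ((q.2.length : Int)))
        (d := PySem.Dict.empty)
        (fun a _ => PySem.Dict.contains_empty a.1)
        (by simpa [PySem.Dict.keys] using pv_groups_nodup (pvKeysOf fs))]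
    rw [PySem.Dict.items_counter, pv_groups_items]
    simp only [List.map_map, Function.comp_def, PySem.Dict.empty, List.nil_append]
    apply List.map_congr_left
    intro k _
    rw [pv_posOf_length]
  have hjoin : ((((pvGroups (pvKeysOf fs)).items.foldl (fun ls q =>
        (PySem.List.enumerate q.2).foldl (fun ls r =>
          ls.set r.2.toNat (PySem.Int.toStr q.1 ++ "e" ++ PySem.Int.toStr r.1)) ls)
        (PySem.List.pyRepeat [""] ((pvKeysOf fs).length : Int))).zip (fs.map Prod.fst)).foldl
        (fun d q => d.insert q.1 q.2) PySem.Dict.empty)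
      = pvJoin fs := by
    rw [pv_labels_eq, pv_zip_eq, List.foldl_map]
    rfl
  rw [show (pvGroups (pvKeysOf fs)) = (PySem.List.enumerate (pvKeysOf fs)).foldl
        (fun g q => g.modify q.2 [] (· ++ [q.1])) PySem.Dict.empty from rfl] at hac hjoin
  rw [Prod.mk.injEq]
  exact ⟨hac, by rw [hjoin]⟩

-- ===== VERDICT (by name: the statement is the Claim_ definition above) =====
theorem get_array_class_spec : Claim_equal_get_array_class := by
  intro fs _
  show get_array_class fs = get_array_class_alt fs
  rw [pv_alt_eq]
  dsimp only [get_array_class]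
  rw [pv_main fs]
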